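-- pv_equiv track=rewrite | github.com/ahsoj/alx-higher_level_programming | 0x03-python-data_structures/4-new_in_list.py | new_in_list
-- ===== SOURCE A (Python) =====
-- def new_in_list(my_list, idx, element):
--     my_list_copy = []
--     for i in range(len(my_list)):
--         my_list_copy.append(my_list[i])
--     if idx < 0:
--         return my_list_copy
--     elif idx >= len(my_list):
--         return my_list_copy
--     else:
--         my_list_copy[idx] = element
--         return my_list_copy
-- ===== SOURCE B (Python) =====
-- def new_in_list(my_list, idx, element):
--     return [element if i == idx else v for i, v in enumerate(my_list)]
-- ===== Notes on version B (the rewrite author's own statement) =====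
-- stated objective: simpler
-- what changed: Replaces the copy-loop plus explicit bounds-check-and-assign with a single comprehension over enumerate that substitutes element exactly where i == idx, making the out-of-range guards disappear.
import Mathlib
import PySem

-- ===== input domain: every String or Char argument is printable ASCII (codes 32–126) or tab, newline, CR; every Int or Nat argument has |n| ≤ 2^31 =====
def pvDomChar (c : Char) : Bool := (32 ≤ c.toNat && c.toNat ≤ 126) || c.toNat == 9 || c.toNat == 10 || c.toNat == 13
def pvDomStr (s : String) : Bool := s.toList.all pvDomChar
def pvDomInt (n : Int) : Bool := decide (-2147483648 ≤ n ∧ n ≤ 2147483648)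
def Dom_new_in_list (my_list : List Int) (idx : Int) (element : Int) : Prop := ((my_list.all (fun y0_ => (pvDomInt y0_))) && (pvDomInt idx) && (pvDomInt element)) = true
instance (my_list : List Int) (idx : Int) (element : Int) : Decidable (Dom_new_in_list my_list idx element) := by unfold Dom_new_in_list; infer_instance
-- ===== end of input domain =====

-- B replaces A's copy-loop + explicit bounds checks + assignment by one comprehension over
-- enumerate that substitutes `element` exactly where i == idx (simpler; same O(n) cost).

-- ===== PORT A =====
def new_in_list (my_list : List Int) (idx : Int) (element : Int) : List Int :=
  -- copy loop: for i in range(len(my_list)): my_list_copy.append(my_list[i])  (index always in range)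
  let my_list_copy :=
    (PySem.List.pyRange 0 my_list.length 1).foldl
      (fun acc i => acc ++ [PySem.List.pyGetD my_list i 0]) []
  if idx < 0 then my_list_copy
  else if idx ≥ my_list.length then my_list_copy
  else my_list_copy.set idx.toNat element

-- ===== PORT B =====
def new_in_list_alt (my_list : List Int) (idx : Int) (element : Int) : List Int :=
  (PySem.List.enumerate my_list 0).map (fun p => if p.1 = idx then element else p.2)

-- ===== PRECONDITION & SPEC =====
def Spec_new_in_list (my_list : List Int) (idx : Int) (element : Int) (out : List Int) : Prop := out = new_in_list_alt my_list idx element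
instance (my_list : List Int) (idx : Int) (element : Int) (out : List Int) : Decidable (Spec_new_in_list my_list idx element out) := by unfold Spec_new_in_list; infer_instance

-- ===== CLAIM (what is proved, stated in full; the proofs are below) =====
def Claim_equal_new_in_list : Prop := ∀ (my_list : List Int) (idx : Int) (element : Int), Dom_new_in_list my_list idx element → Spec_new_in_list my_list idx element (new_in_list my_list idx element)

-- ===== LEMMAS AND PROOFS =====

theorem foldl_append_singleton (xs : List Int) (init : List Int) :
    xs.foldl (fun acc v => acc ++ [v]) init = init ++ xs := by
  induction xs generalizing init with
  | nil => simp [List.foldl]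
  | cons x xs ih => simp [List.foldl, ih]

theorem copy_eq (my_list : List Int) :
    (PySem.List.pyRange 0 my_list.length 1).foldl
      (fun acc i => acc ++ [PySem.List.pyGetD my_list i 0]) [] = my_list := by
  rw [PySem.List.foldl_pyRange_zero_pyGetD' my_list 0 (fun acc v => acc ++ [v]) []]
  rw [foldl_append_singleton]
  simp

theorem enum_map_set (xs : List Int) (s idx e : Int) :
    (PySem.List.enumerate xs s).map (fun p => if p.1 = idx then e else p.2) =
      if s ≤ idx ∧ idx < s + xs.length then xs.set (idx - s).toNat e else xs := by
  induction xs generalizing s with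
  | nil => simp [PySem.List.enumerate_nil]
  | cons x xs ih =>
    rw [PySem.List.enumerate_cons]
    simp only [List.map_cons, ih (s+1)]
    by_cases h : s = idx
    · subst h
      have h1 : s ≤ s ∧ s < s + ((x :: xs).length : Int) := by
        refine ⟨le_refl s, ?_⟩
        simp
      rw [if_pos rfl, if_pos h1]
      have h2 : ¬ (s + 1 ≤ s ∧ s < s + 1 + (xs.length : Int)) := by omega
      rw [if_neg h2]
      simp
    · rw [if_neg h]
      by_cases h3 : s + 1 ≤ idx ∧ idx < s + 1 + (xs.length : Int)
      · rw [if_pos h3]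
        have h4 : s ≤ idx ∧ idx < s + ((x :: xs).length : Int) := by
          refine ⟨by omega, ?_⟩
          simp
          omega
        rw [if_pos h4]
        have h5 : (idx - s).toNat = (idx - (s+1)).toNat + 1 := by omega
        simp [h5]
      · rw [if_neg h3]
        have h6 : ¬ (s ≤ idx ∧ idx < s + ((x :: xs).length : Int)) := by
          simp; omega
        rw [if_neg h6]

-- ===== VERDICT (by name: the statement is the Claim_ definition above) =====
theorem new_in_list_spec : Claim_equal_new_in_list := by
  intro my_list idx element _
  unfold Spec_new_in_list new_in_list new_in_list_alt
  rw [enum_map_set, copy_eq]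
  by_cases h0 : idx < 0
  · rw [if_pos h0, if_neg (by omega)]
  · rw [if_neg h0]
    by_cases h1 : idx ≥ (my_list.length : Int)
    · rw [if_pos h1, if_neg (by omega)]
    · rw [if_neg h1, if_pos (by omega)]
      simp
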